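-- pv_equiv track=rewrite | github.com/camilo-s/advent2023 | 04/sol.py | reproduce_cards
-- ===== SOURCE A (Python) =====
-- def reproduce_cards(n, cards):
--     """Do recursive stuff."""
--     if n == 0:
--         return {i: 1 for i in range(len(cards))}
--     else:
--         new_cards = reproduce_cards(n - 1, cards)
--         for i in range(n, n + cards[n - 1]):
--             new_cards[i] += new_cards[n - 1]
--         return new_cards
-- ===== SOURCE B (Python) =====
-- def reproduce_cards(n, cards):
--     """Forward pass over a flat list of counts, packaged as a dict at the end."""
--     counts = [1] * len(cards)
--     for j in range(n):
--         for i in range(j + 1, j + 1 + cards[j]):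
--             counts[i] += counts[j]
--     return dict(enumerate(counts))
-- ===== Notes on version B (the rewrite author's own statement) =====
-- stated objective: simpler
-- what changed: Replaces the linear recursion on n threading a dict accumulator with a flat list of counts updated by a forward loop over j in range(n), packaged into a dict only at the end.
import Mathlib
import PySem

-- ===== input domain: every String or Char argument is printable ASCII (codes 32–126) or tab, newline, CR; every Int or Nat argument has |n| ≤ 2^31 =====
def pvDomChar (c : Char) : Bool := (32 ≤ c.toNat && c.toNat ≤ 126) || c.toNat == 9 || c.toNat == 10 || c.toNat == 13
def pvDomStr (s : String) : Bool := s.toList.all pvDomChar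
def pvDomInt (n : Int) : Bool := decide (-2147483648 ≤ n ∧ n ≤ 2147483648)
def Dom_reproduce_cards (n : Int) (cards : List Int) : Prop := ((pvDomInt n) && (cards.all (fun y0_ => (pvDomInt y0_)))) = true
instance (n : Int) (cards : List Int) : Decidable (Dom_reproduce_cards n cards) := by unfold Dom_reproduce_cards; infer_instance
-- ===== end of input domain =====

-- B replaces A's linear recursion on n (dict threaded through the unwind) with a forward loop
-- updating a flat list of counts, packaged as a dict only at the end; return-value equivalence.

-- ===== PORT A =====
-- {i: 1 for i in range(len(cards))}
def pvBaseA (cards : List Int) : PySem.Dict Int Int :=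
  (PySem.List.pyRange 0 cards.length 1).foldl (fun d i => d.insert i 1) PySem.Dict.empty

-- the loop body of one recursion level: for i in range(n, n + cards[n-1]): new_cards[i] += new_cards[n-1]
-- (cards[n-1] via pyGet?, default 0 only on the out-of-range case Pre_ excludes; dict update via modify,
--  default 0 only on the missing-key (KeyError) case Pre_ excludes)
def pvStepA (cards : List Int) (m : Int) (nc : PySem.Dict Int Int) : PySem.Dict Int Int :=
  (PySem.List.pyRange m (m + (PySem.List.pyGet? cards (m - 1)).getD 0) 1).foldl
    (fun d i => d.modify i 0 (fun v => v + d.getD (m - 1) 0)) nc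

-- recursion on n, done on n.toNat; Python raises RecursionError for n < 0 (excluded by Pre_)
def pvRecA (cards : List Int) : Nat → PySem.Dict Int Int
  | 0 => pvBaseA cards
  | k + 1 => pvStepA cards ((k : Int) + 1) (pvRecA cards k)

def reproduce_cards (n : Int) (cards : List Int) : List (Int × Int) :=
  (pvRecA cards n.toNat).items

-- ===== PORT B =====
-- inner loop on the flat list: for i in range(j + 1, j + 1 + cards[j]): counts[i] += counts[j]
-- (list assignment via pySetD / reads via pyGet?, exact on the in-range indices Pre_ admits)
def pvStepB (cards : List Int) (counts : List Int) (j : Int) : List Int :=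
  (PySem.List.pyRange (j + 1) (j + 1 + (PySem.List.pyGet? cards j).getD 0) 1).foldl
    (fun cs i => PySem.List.pySetD cs i
      ((PySem.List.pyGet? cs i).getD 0 + (PySem.List.pyGet? cs j).getD 0)) counts

-- counts = [1] * len(cards); for j in range(n): …; return dict(enumerate(counts))
def reproduce_cards_alt (n : Int) (cards : List Int) : List (Int × Int) :=
  PySem.List.enumerate
    ((PySem.List.pyRange 0 n 1).foldl (pvStepB cards) (List.replicate cards.length 1)) 0

-- ===== PRECONDITION & SPEC =====
-- Pre_ is exactly where Python A returns: n < 0 recurses forever (RecursionError); n > len(cards) raises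
-- IndexError at cards[n-1]; a card reaching past the end raises KeyError on new_cards[i].
def Pre_reproduce_cards (n : Int) (cards : List Int) : Prop :=
  0 ≤ n ∧ n ≤ cards.length ∧
  ∀ k ∈ List.range n.toNat, ((k : Int) + 1) + (PySem.List.pyGet? cards (k : Int)).getD 0 ≤ cards.length
instance (n : Int) (cards : List Int) : Decidable (Pre_reproduce_cards n cards) := by
  unfold Pre_reproduce_cards; infer_instance

def pvWitness_reproduce_cards : Int × List Int := (2, [2, 1, 0])

def Spec_reproduce_cards (n : Int) (cards : List Int) (out : List (Int × Int)) : Prop :=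
  out = reproduce_cards_alt n cards
instance (n : Int) (cards : List Int) (out : List (Int × Int)) : Decidable (Spec_reproduce_cards n cards out) := by
  unfold Spec_reproduce_cards; infer_instance

-- ===== CLAIM (what is proved, stated in full; the proofs are below) =====
def Claim_equal_reproduce_cards : Prop := ∀ (n : Int) (cards : List Int), Dom_reproduce_cards n cards → Pre_reproduce_cards n cards → Spec_reproduce_cards n cards (reproduce_cards n cards)

-- ===== LEMMAS AND PROOFS =====

-- the dict whose items are exactly enumerate(l): the shape both sides are reduced to
def pvEnumDict (l : List Int) : PySem.Dict Int Int := PySem.Dict.mk (PySem.List.enumerate l 0)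

theorem pvEnumDict_keys (l : List Int) :
    (pvEnumDict l).keys = PySem.List.pyRange 0 l.length 1 := by
  simpa [pvEnumDict, PySem.Dict.keys] using PySem.List.map_fst_enumerate l 0

theorem pvEnumDict_keys_nodup (l : List Int) : (pvEnumDict l).keys.Nodup := by
  rw [pvEnumDict_keys]; exact PySem.List.nodup_pyRange_one 0 (l.length : Int)

theorem pvEnumDict_getD (l : List Int) (j : Nat) (hj : j < l.length) :
    (pvEnumDict l).getD ((j : Int)) 0 = l.getD j 0 := by
  have hmem : ((j : Int), l[j]) ∈ PySem.List.enumerate l 0 := by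
    rw [PySem.List.mem_enumerate_iff]
    exact ⟨j, hj, by simp⟩
  have := PySem.Dict.getD_of_mem_items (d := pvEnumDict l) (k := (j : Int)) (v := l[j])
    (d0 := 0) hmem (pvEnumDict_keys_nodup l)
  rw [this, List.getD_eq_getElem?_getD, List.getElem?_eq_getElem hj, Option.getD_some]

theorem pvEnumDict_modify (l : List Int) (i : Nat) (hi : i < l.length) (f : Int → Int) :
    (pvEnumDict l).modify ((i : Int)) 0 f = pvEnumDict (l.set i (f (l.getD i 0))) := by
  have hcont : (pvEnumDict l).contains ((i : Int)) = true := by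
    rw [PySem.Dict.contains_iff_mem_keys, pvEnumDict_keys, PySem.List.mem_pyRange_one]
    constructor <;> [positivity; exact_mod_cast hi]
  have hmod : (pvEnumDict l).modify ((i : Int)) 0 f
      = (pvEnumDict l).insert ((i : Int)) (f ((pvEnumDict l).getD ((i : Int)) 0)) := rfl
  apply PySem.Dict.ext
  rw [hmod, PySem.Dict.items_insert_of_contains _ _ hcont, pvEnumDict_getD l i hi]
  show (PySem.List.enumerate l 0).map _ = PySem.List.enumerate (l.set i (f (l.getD i 0))) 0
  apply List.ext_getElem
  · simp [PySem.List.length_enumerate]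
  · intro k hk hk'
    have hkl : k < l.length := by simpa [PySem.List.length_enumerate] using hk
    rw [List.getElem_map, PySem.List.getElem_enumerate, PySem.List.getElem_enumerate]
    by_cases hki : k = i
    · subst hki
      simp [List.getElem_set_self]
    · have hne : ((0 + (k : Int)) == (i : Int)) = false := by
        simp; omega
      rw [hne]
      simp only [Bool.false_eq_true, if_false]
      rw [List.getElem_set_ne (by omega)]

-- the inner loops agree: A's dict-modify pass over any in-range index list is B's list-set pass
theorem pvInner (j : Nat) (is : List Int) :
    ∀ (l : List Int), (∀ i ∈ is, 0 ≤ i ∧ i < (l.length : Int)) → j < l.length →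
    is.foldl (fun d i => d.modify i 0 (fun v => v + d.getD ((j : Int)) 0)) (pvEnumDict l)
      = pvEnumDict (is.foldl (fun cs i => PySem.List.pySetD cs i
          ((PySem.List.pyGet? cs i).getD 0 + (PySem.List.pyGet? cs ((j : Int))).getD 0)) l) := by
  induction is with
  | nil => intro l _ _; rfl
  | cons i is ih =>
    intro l hin hj
    obtain ⟨hi0, hil⟩ := hin i (List.mem_cons_self ..)
    obtain ⟨t, rfl⟩ := Int.eq_ofNat_of_zero_le hi0
    have hitl : t < l.length := by exact_mod_cast hil
    have hstepA :
        (pvEnumDict l).modify ((t : Int)) 0 (fun v => v + (pvEnumDict l).getD ((j : Int)) 0)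
          = pvEnumDict (l.set t (l.getD t 0 + l.getD j 0)) := by
      rw [pvEnumDict_modify l t hitl, pvEnumDict_getD l j hj]
    have hstepB :
        PySem.List.pySetD l ((t : Int)) ((PySem.List.pyGet? l ((t : Int))).getD 0 + (PySem.List.pyGet? l ((j : Int))).getD 0)
          = l.set t (l.getD t 0 + l.getD j 0) := by
      rw [PySem.List.pySetD_natCast, PySem.List.pyGet?_natCast, PySem.List.pyGet?_natCast]
      simp [List.getD_eq_getElem?_getD, List.getElem?_eq_getElem hitl,
        List.getElem?_eq_getElem hj]
    rw [List.foldl_cons, List.foldl_cons, hstepA, hstepB]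
    exact ih _ (by
      intro i' hi'
      have := hin i' (List.mem_cons_of_mem _ hi')
      simpa using this) (by simpa using hj)

-- B's inner pass preserves the length of the counts list
theorem pvStepB_length (cards : List Int) (counts : List Int) (j : Int) :
    (pvStepB cards counts j).length = counts.length := by
  unfold pvStepB
  generalize PySem.List.pyRange (j + 1) (j + 1 + (PySem.List.pyGet? cards j).getD 0) 1 = is
  induction is generalizing counts with
  | nil => rfl
  | cons i is ih => rw [List.foldl_cons, ih, PySem.List.length_pySetD]

-- base case: the dict comprehension {i: 1 …} is the enum-dict of [1] * len(cards)
theorem pvBase_eq (cards : List Int) :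
    pvBaseA cards = pvEnumDict (List.replicate cards.length 1) := by
  apply PySem.Dict.ext
  unfold pvBaseA
  have h := PySem.Dict.items_foldl_insert_fresh (PySem.List.pyRange 0 (cards.length : Int) 1)
      (fun i => i) (fun _ => (1 : Int)) PySem.Dict.empty
      (fun a _ => PySem.Dict.contains_empty a)
      (by simpa using PySem.List.nodup_pyRange_one 0 (cards.length : Int))
  rw [h]
  show _ = PySem.List.enumerate (List.replicate cards.length (1 : Int)) 0
  rw [PySem.List.enumerate_eq_map_pyRange (List.replicate cards.length (1 : Int)) 0,
    show PySem.Dict.empty.items = ([] : List (Int × Int)) from rfl, List.nil_append]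
  simp only [PySem.List.len_eq, List.length_replicate]
  apply List.map_congr_left
  intro i hi
  rw [PySem.List.mem_pyRange_one] at hi
  have hlen : i < (((List.replicate cards.length (1 : Int)).length : Nat) : Int) := by
    simpa using hi.2
  rw [PySem.List.pyGetD_eq_getElem _ 0 hi.1 hlen, List.getElem_replicate]

-- the outer induction: A's recursion unwound k times is B's forward loop run to k
theorem pvOuter (cards : List Int) (N : Nat) (hN : N ≤ cards.length)
    (hb : ∀ k ∈ List.range N,
      ((k : Int) + 1) + (PySem.List.pyGet? cards (k : Int)).getD 0 ≤ cards.length) :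
    ∀ k, k ≤ N →
      pvRecA cards k
        = pvEnumDict ((PySem.List.pyRange 0 (k : Int) 1).foldl (pvStepB cards)
            (List.replicate cards.length 1))
      ∧ ((PySem.List.pyRange 0 (k : Int) 1).foldl (pvStepB cards)
            (List.replicate cards.length 1)).length = cards.length := by
  intro k
  induction k with
  | zero =>
    intro _
    rw [PySem.List.pyRange_one_eq_nil (by omega)]
    exact ⟨pvBase_eq cards, by simp⟩
  | succ k ih =>
    intro hk1
    obtain ⟨heq, hlen⟩ := ih (by omega)
    have hsplit : PySem.List.pyRange 0 ((k : Nat) + 1 : Nat) 1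
        = PySem.List.pyRange 0 (k : Int) 1 ++ [(k : Int)] := by
      rw [show (((k : Nat) + 1 : Nat) : Int) = (k : Int) + 1 by push_cast; ring]
      exact PySem.List.pyRange_one_succ_right (by omega)
    rw [hsplit, List.foldl_append, List.foldl_cons, List.foldl_nil]
    set l := (PySem.List.pyRange 0 (k : Int) 1).foldl (pvStepB cards)
      (List.replicate cards.length 1) with hl
    have hklen : k < cards.length := by omega
    have hbk := hb k (List.mem_range.mpr (by omega))
    have hrec : pvRecA cards (k + 1) = pvStepA cards ((k : Int) + 1) (pvRecA cards k) := rfl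
    constructor
    · rw [hrec, heq]
      unfold pvStepA pvStepB
      rw [show (k : Int) + 1 - 1 = (k : Int) by ring]
      rw [pvInner k _ l (by
          intro i hi
          rw [PySem.List.mem_pyRange_one] at hi
          constructor
          · omega
          · rw [hlen]; omega)
        (by omega)]
    · rw [show pvStepB cards l (k : Int)
          = (PySem.List.pyRange ((k : Int) + 1) ((k : Int) + 1 + (PySem.List.pyGet? cards (k : Int)).getD 0) 1).foldl
              (fun cs i => PySem.List.pySetD cs i
                ((PySem.List.pyGet? cs i).getD 0 + (PySem.List.pyGet? cs ((k : Int))).getD 0)) l from rfl]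
      rw [show ((PySem.List.pyRange ((k : Int) + 1) ((k : Int) + 1 + (PySem.List.pyGet? cards (k : Int)).getD 0) 1).foldl
              (fun cs i => PySem.List.pySetD cs i
                ((PySem.List.pyGet? cs i).getD 0 + (PySem.List.pyGet? cs ((k : Int))).getD 0)) l)
          = pvStepB cards l (k : Int) from rfl]
      rw [pvStepB_length, hlen]

-- ===== VERDICT (by name: the statement is the Claim_ definition above) =====
theorem reproduce_cards_spec : Claim_equal_reproduce_cards := by
  intro n cards _ hpre
  obtain ⟨hn0, hnlen, hb⟩ := hpre
  unfold Spec_reproduce_cards reproduce_cards reproduce_cards_alt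
  have hNlen : n.toNat ≤ cards.length := by omega
  obtain ⟨heq, _⟩ := pvOuter cards n.toNat hNlen hb n.toNat (le_refl _)
  rw [heq, show n = ((n.toNat : Nat) : Int) from (Int.toNat_of_nonneg hn0).symm]
  rfl
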